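-- pv_equiv track=rewrite | github.com/Epi-Sim/episim-rl | src/myRL-episim.py | map_observables_to_state_space
-- ===== SOURCE A (Python) =====
-- def map_observables_to_state_space(value, map_dict):
--     thresholds = {int(k): v for k, v in map_dict.items()}  # Convert keys to integers
--     sorted_thresholds = sorted(thresholds.items())  # Sort thresholds
--
--     new_value = 1  # Default to the lowest category
--     for threshold, category in sorted_thresholds:
--         if value >= threshold:
--             new_value = category
--         else:
--             break
--     return new_value
-- ===== SOURCE B (Python) =====
-- def map_observables_to_state_space(value, map_dict):
--     thresholds = {int(k): v for k, v in map_dict.items()}  # same int-keyed dict (collision semantics preserved)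
--     candidates = [(t, c) for t, c in thresholds.items() if value >= t]
--     if not candidates:
--         return 1  # no threshold qualifies: lowest category
--     return max(candidates, key=lambda x: x[0])[1]
-- ===== Notes on version B (the rewrite author's own statement) =====
-- stated objective: alternative
-- what changed: Replaces A's sort of all thresholds followed by a sequential scan with break by a single filter of the qualifying thresholds and one argmax pass (category of the largest qualifying threshold, default 1).
import Mathlib
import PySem

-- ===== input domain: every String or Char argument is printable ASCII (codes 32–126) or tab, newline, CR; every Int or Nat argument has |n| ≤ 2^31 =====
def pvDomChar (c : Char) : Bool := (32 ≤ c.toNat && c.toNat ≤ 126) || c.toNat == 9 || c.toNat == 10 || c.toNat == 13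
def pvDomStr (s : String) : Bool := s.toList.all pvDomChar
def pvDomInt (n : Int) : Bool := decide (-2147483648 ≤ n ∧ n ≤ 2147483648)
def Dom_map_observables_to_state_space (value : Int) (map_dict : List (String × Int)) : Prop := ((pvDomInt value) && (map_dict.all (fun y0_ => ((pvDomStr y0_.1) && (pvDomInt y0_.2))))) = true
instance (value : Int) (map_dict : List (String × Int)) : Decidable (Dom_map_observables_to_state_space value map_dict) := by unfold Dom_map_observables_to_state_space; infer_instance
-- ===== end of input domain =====

-- B replaces A's sort-then-scan-with-break by filter + single argmax pass; equivalence proved on inputs whose keys all parse as ints.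

-- shared helper: the dict comprehension {int(k): v for k, v in map_dict.items()} (identical first line of A and B).
-- Under Pre_ every key parses, so the '.getD 0' default is never used (int(k) raises exactly where ofStr? is none).
def pvThresholds (map_dict : List (String × Int)) : PySem.Dict Int Int :=
  map_dict.foldl (fun d p => d.insert ((PySem.Int.ofStr? p.1).getD 0) p.2) PySem.Dict.empty

-- ===== PORT A =====
-- the for-loop with break over sorted_thresholds, carrying new_value
def pvMossLoop (value : Int) : List (Int × Int) → Int → Int
  | [], acc => acc
  | (t, c) :: rest, acc => if value ≥ t then pvMossLoop value rest c else acc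

def map_observables_to_state_space (value : Int) (map_dict : List (String × Int)) : Int :=
  let thresholds := pvThresholds map_dict
  -- sorted(thresholds.items()): dict keys are unique, so tuple sort equals the stable sort by key; exact here
  let sorted_thresholds := PySem.List.sorted thresholds.items (fun p => p.1)
  pvMossLoop value sorted_thresholds 1

-- ===== PORT B =====
def map_observables_to_state_space_alt (value : Int) (map_dict : List (String × Int)) : Int :=
  let thresholds := pvThresholds map_dict
  let candidates := thresholds.items.filter (fun p => value ≥ p.1)
  match PySem.List.max? candidates (fun p => p.1) with
  | none => 1
  | some p => p.2

-- ===== PRECONDITION & SPEC =====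
-- Pre_ excludes exactly the inputs where int(k) raises ValueError (a key that does not parse as an int).
def Pre_map_observables_to_state_space (value : Int) (map_dict : List (String × Int)) : Prop :=
  map_dict.all (fun p => (PySem.Int.ofStr? p.1).isSome) = true
instance (value : Int) (map_dict : List (String × Int)) : Decidable (Pre_map_observables_to_state_space value map_dict) := by unfold Pre_map_observables_to_state_space; infer_instance

def pvWitness_map_observables_to_state_space : Int × (List (String × Int)) := (5, [("3", 2), ("10", 3)])

def Spec_map_observables_to_state_space (value : Int) (map_dict : List (String × Int)) (out : Int) : Prop := out = map_observables_to_state_space_alt value map_dict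
instance (value : Int) (map_dict : List (String × Int)) (out : Int) : Decidable (Spec_map_observables_to_state_space value map_dict out) := by unfold Spec_map_observables_to_state_space; infer_instance

-- ===== CLAIM (what is proved, stated in full; the proofs are below) =====
def Claim_equal_map_observables_to_state_space : Prop := ∀ (value : Int) (map_dict : List (String × Int)), Dom_map_observables_to_state_space value map_dict → Pre_map_observables_to_state_space value map_dict → Spec_map_observables_to_state_space value map_dict (map_observables_to_state_space value map_dict)

-- ===== LEMMAS AND PROOFS =====

-- two elements of a list with strictly increasing first components and equal firsts are equal
theorem pv_eq_of_pairwise_lt {L : List (Int × Int)}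
    (h : L.Pairwise (fun a b => a.1 < b.1)) {x y : Int × Int}
    (hx : x ∈ L) (hy : y ∈ L) (hk : x.1 = y.1) : x = y := by
  have hnd : (L.map Prod.fst).Nodup := by
    have := (List.pairwise_map (f := Prod.fst) (l := L)).2 h
    exact List.Pairwise.imp (fun hlt => ne_of_lt hlt) this
  exact List.inj_on_of_nodup_map hnd hx hy hk

-- argmax by fst is permutation-invariant when the target list has nodup-style strict structure on firsts
theorem pv_max?_eq_of_perm {xs ys : List (Int × Int)}
    (hperm : xs.Perm ys) (hy : ys.Pairwise (fun a b => a.1 < b.1)) :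
    PySem.List.max? xs (fun p => p.1) = PySem.List.max? ys (fun p => p.1) := by
  cases hxs : PySem.List.max? xs (fun p => p.1) with
  | none =>
      have : xs = [] := (PySem.List.max?_eq_none_iff xs _).1 hxs
      subst this
      have : ys = [] := (List.Perm.nil_eq hperm).symm
      simp [this, PySem.List.max?]
  | some m =>
      cases hys : PySem.List.max? ys (fun p => p.1) with
      | none =>
          have : ys = [] := (PySem.List.max?_eq_none_iff ys _).1 hys
          subst this
          have : xs = [] := List.Perm.eq_nil hperm
          subst this
          simp [PySem.List.max?] at hxs
      | some m' =>
          have hmx : m ∈ xs := PySem.List.max?_mem hxs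
          have hm'y : m' ∈ ys := PySem.List.max?_mem hys
          have hmy : m ∈ ys := hperm.mem_iff.1 hmx
          have hm'x : m' ∈ xs := hperm.mem_iff.2 hm'y
          have h1 : m.1 ≤ m'.1 := PySem.List.max?_isMax hys m hmy
          have h2 : m'.1 ≤ m.1 := PySem.List.max?_isMax hxs m' hm'x
          have : m = m' := pv_eq_of_pairwise_lt hy hmy hm'y (le_antisymm h1 h2)
          simp [this]

-- A's scan-with-break over a strictly key-increasing list equals B's filter + argmax (with default acc)
theorem pv_loop_eq (value : Int) (L : List (Int × Int)) (acc : Int)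
    (h : L.Pairwise (fun a b => a.1 < b.1)) :
    pvMossLoop value L acc =
      (match PySem.List.max? (L.filter (fun p => value ≥ p.1)) (fun p => p.1) with
       | none => acc
       | some p => p.2) := by
  induction L generalizing acc with
  | nil => simp [pvMossLoop, PySem.List.max?]
  | cons hd tl ih =>
      obtain ⟨t, c⟩ := hd
      have hhead : ∀ p ∈ tl, t < p.1 := by
        intro p hp; exact (List.pairwise_cons.1 h).1 p hp
      have htl : tl.Pairwise (fun a b => a.1 < b.1) := (List.pairwise_cons.1 h).2
      by_cases hv : value ≥ t
      · have hfil : ((t, c) :: tl).filter (fun p => value ≥ p.1)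
            = (t, c) :: tl.filter (fun p => value ≥ p.1) := by
          simp [hv]
        rw [hfil]
        have hF := htl.filter (fun p => decide (value ≥ p.1))
        cases hFmax : PySem.List.max? (tl.filter (fun p => value ≥ p.1)) (fun p => p.1) with
        | none =>
            have hFnil : tl.filter (fun p => value ≥ p.1) = [] :=
              (PySem.List.max?_eq_none_iff _ _).1 hFmax
            rw [hFnil]
            have := ih c htl
            rw [hFnil] at this
            simp [pvMossLoop, hv, this, PySem.List.max?]
        | some p =>
            have hpF : p ∈ tl.filter (fun p => value ≥ p.1) := PySem.List.max?_mem hFmax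
            have hptl : p ∈ tl := List.mem_of_mem_filter hpF
            have htp : t < p.1 := hhead p hptl
            -- max? of the cons list is still p
            have hcons : PySem.List.max? ((t, c) :: tl.filter (fun p => value ≥ p.1)) (fun p => p.1) = some p := by
              cases hq : PySem.List.max? ((t, c) :: tl.filter (fun p => value ≥ p.1)) (fun p => p.1) with
              | none =>
                  have := (PySem.List.max?_eq_none_iff _ _).1 hq
                  simp at this
              | some q =>
                  have hqmem : q ∈ (t, c) :: tl.filter (fun p => value ≥ p.1) := PySem.List.max?_mem hq
                  have hpq : p.1 ≤ q.1 :=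
                    PySem.List.max?_isMax hq p (List.mem_cons_of_mem _ hpF)
                  rcases List.mem_cons.1 hqmem with hq1 | hq2
                  · exfalso
                    have : q.1 = t := by rw [hq1]
                    omega
                  · have hqp : q.1 ≤ p.1 := PySem.List.max?_isMax hFmax q hq2
                    have : q = p := pv_eq_of_pairwise_lt hF hq2 hpF (le_antisymm hqp hpq)
                    rw [this]
            rw [hcons]
            have := ih c htl
            rw [hFmax] at this
            simp [pvMossLoop, hv, this]
      · -- break immediately: no element qualifies
        have hfil : ((t, c) :: tl).filter (fun p => value ≥ p.1) = [] := by
          rw [List.filter_eq_nil_iff]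
          intro p hp
          rcases List.mem_cons.1 hp with h1 | h2
          · simp [h1]; omega
          · have := hhead p h2; simp; omega
        rw [hfil]
        simp [pvMossLoop, hv, PySem.List.max?]

-- the built dict has nodup keys
theorem pv_nodup_keys_aux (l : List (String × Int)) (d : PySem.Dict Int Int)
    (h : d.keys.Nodup) :
    (l.foldl (fun d p => d.insert ((PySem.Int.ofStr? p.1).getD 0) p.2) d).keys.Nodup := by
  induction l generalizing d with
  | nil => exact h
  | cons hd tl ih =>
      exact ih _ (PySem.Dict.nodup_keys_insert d _ _ h)

theorem pv_nodup_keys (map_dict : List (String × Int)) :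
    (pvThresholds map_dict).keys.Nodup :=
  pv_nodup_keys_aux map_dict PySem.Dict.empty PySem.Dict.nodup_keys_empty

-- ===== VERDICT (by name: the statement is the Claim_ definition above) =====
theorem map_observables_to_state_space_spec : Claim_equal_map_observables_to_state_space := by
  intro value md _ _
  unfold Spec_map_observables_to_state_space
  show pvMossLoop value (PySem.List.sorted (pvThresholds md).items (fun p => p.1)) 1 = _
  have hperm : (PySem.List.sorted (pvThresholds md).items (fun p => p.1)).Perm
      (pvThresholds md).items := PySem.List.sorted_perm _ _ _
  have hnd : ((pvThresholds md).items.map Prod.fst).Nodup := by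
    have := pv_nodup_keys md
    simpa [PySem.Dict.keys] using this
  have hndS : ((PySem.List.sorted (pvThresholds md).items (fun p => p.1)).map Prod.fst).Nodup :=
    ((hperm.map Prod.fst).nodup_iff).2 hnd
  have hle := PySem.List.sorted_pairwise (pvThresholds md).items (fun p => p.1)
  have hne : (PySem.List.sorted (pvThresholds md).items (fun p => p.1)).Pairwise
      (fun a b => a.1 ≠ b.1) := (List.pairwise_map).1 hndS
  have hS : (PySem.List.sorted (pvThresholds md).items (fun p => p.1)).Pairwise
      (fun a b => a.1 < b.1) := (hle.and hne).imp (fun h => lt_of_le_of_ne h.1 h.2)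
  have halt : map_observables_to_state_space_alt value md =
      (match PySem.List.max? ((pvThresholds md).items.filter (fun p => value ≥ p.1)) (fun p => p.1) with
       | none => 1
       | some p => p.2) := rfl
  rw [pv_loop_eq value _ 1 hS, halt,
    pv_max?_eq_of_perm ((hperm.filter _).symm) (hS.filter _)]
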